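-- pv_equiv track=rewrite | github.com/eliannaqk/mdk | src/format_nanobody.py | extract_paratope
-- ===== SOURCE A (Python) =====
-- from typing import List, Dict, Tuple, Optional
--
-- def extract_paratope(
--     sequence: str,
--     interface_residues: List[int],
--     min_cluster_size: int = 3
-- ) -> List[int]:
--     """
--     Extract paratope residues from designed sequence
--
--     Args:
--         sequence: Designed binder sequence
--         interface_residues: Predicted interface residue positions
--         min_cluster_size: Minimum size for paratope cluster
--
--     Returns:
--         List of paratope residue positions
--     """
--
--     if not interface_residues:
--         # If no interface info, use middle third as default
--         length = len(sequence)
--         start = length // 3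
--         end = 2 * length // 3
--         return list(range(start, end))
--
--     # Filter and cluster interface residues
--     paratope = []
--     interface_sorted = sorted(interface_residues)
--
--     current_cluster = [interface_sorted[0]]
--
--     for i in range(1, len(interface_sorted)):
--         if interface_sorted[i] - interface_sorted[i-1] <= 3:
--             current_cluster.append(interface_sorted[i])
--         else:
--             if len(current_cluster) >= min_cluster_size:
--                 paratope.extend(current_cluster)
--             current_cluster = [interface_sorted[i]]
--
--     if len(current_cluster) >= min_cluster_size:
--         paratope.extend(current_cluster)
--
--     return sorted(paratope)
-- ===== SOURCE B (Python) =====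
-- def extract_paratope(sequence, interface_residues, min_cluster_size=3):
--     if not interface_residues:
--         length = len(sequence)
--         return list(range(length // 3, 2 * length // 3))
--
--     present = set(interface_residues)
--
--     def chain_end(v):
--         # follow links to the next residue at distance <= 3 until none exists;
--         # the value reached identifies v's cluster (its largest residue)
--         while True:
--             if v + 1 in present:
--                 v = v + 1
--             elif v + 2 in present:
--                 v = v + 2
--             elif v + 3 in present:
--                 v = v + 3
--             else:
--                 return v
--
--     weight = {}
--     for v in interface_residues:
--         e = chain_end(v)
--         weight[e] = weight.get(e, 0) + 1
--
--     return sorted(v for v in interface_residues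
--                   if weight[chain_end(v)] >= min_cluster_size)
-- ===== Notes on version B (the rewrite author's own statement) =====
-- stated objective: alternative
-- what changed: B drops A's sorted-gap clustering scan entirely: it treats the residues as a value graph (a set with edges v -> v+1/v+2/v+3 when present), identifies each residue's cluster by pointer-chasing to its largest reachable value (chain_end), accumulates cluster weights in a dict keyed by that endpoint, and finally filters and sorts; A instead sorts first and accumulates clusters by comparing adjacent gaps.
import Mathlib
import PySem

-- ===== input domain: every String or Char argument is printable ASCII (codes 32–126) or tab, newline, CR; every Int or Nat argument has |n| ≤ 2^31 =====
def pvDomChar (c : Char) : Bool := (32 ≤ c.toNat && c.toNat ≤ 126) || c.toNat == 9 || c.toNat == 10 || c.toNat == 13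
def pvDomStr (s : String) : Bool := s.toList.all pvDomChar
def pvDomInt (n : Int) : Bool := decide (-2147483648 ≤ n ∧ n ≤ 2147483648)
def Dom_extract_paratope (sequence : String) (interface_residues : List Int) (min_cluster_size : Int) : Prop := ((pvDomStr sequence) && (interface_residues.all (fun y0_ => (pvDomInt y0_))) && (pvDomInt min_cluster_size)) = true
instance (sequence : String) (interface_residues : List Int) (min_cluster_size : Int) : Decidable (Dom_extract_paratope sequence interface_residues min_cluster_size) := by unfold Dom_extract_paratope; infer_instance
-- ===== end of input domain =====

-- B replaces A's sorted-gap clustering scan with reachability on the residue value set: each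
-- residue's cluster is identified by pointer-chasing (v -> v+1/v+2/v+3 while present) to its
-- largest reachable value, weights are accumulated per endpoint in a dict, then filter and sort.
-- Alternative structure, same results; not claimed faster.

-- ===== PORT A =====
def extract_paratope (sequence : String) (interface_residues : List Int) (min_cluster_size : Int) : List Int :=
  if interface_residues = [] then
    let length : Int := PySem.Str.len sequence
    let start : Int := PySem.Int.floordiv length 3
    let stop : Int := PySem.Int.floordiv (2 * length) 3
    PySem.List.pyRange start stop
  else
    let interface_sorted := PySem.List.sorted interface_residues (fun x => x)
    let st := (PySem.List.pyRange 1 (interface_sorted.length : Int)).foldl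
      (fun st i =>
        if PySem.List.pyGetD interface_sorted i 0 - PySem.List.pyGetD interface_sorted (i - 1) 0 ≤ 3 then
          (st.1, st.2 ++ [PySem.List.pyGetD interface_sorted i 0])
        else
          ((if min_cluster_size ≤ (st.2.length : Int) then st.1 ++ st.2 else st.1),
           [PySem.List.pyGetD interface_sorted i 0]))
      (([] : List Int), [PySem.List.pyGetD interface_sorted 0 0])
    let paratope := if min_cluster_size ≤ (st.2.length : Int) then st.1 ++ st.2 else st.1
    PySem.List.sorted paratope (fun x => x)

-- ===== PORT B =====
-- Source B's chain_end while-loop; the fuel only makes the recursion structural: every iteration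
-- moves to a strictly larger member of `present`, so any fuel ≥ |interface_residues| runs the
-- Python loop to completion (the port passes exactly that fuel).
def epChainEnd (present : PySem.Set Int) : Nat → Int → Int
  | 0, v => v
  | fuel + 1, v =>
    if present.contains (v + 1) then epChainEnd present fuel (v + 1)
    else if present.contains (v + 2) then epChainEnd present fuel (v + 2)
    else if present.contains (v + 3) then epChainEnd present fuel (v + 3)
    else v

def extract_paratope_alt (sequence : String) (interface_residues : List Int) (min_cluster_size : Int) : List Int :=
  if interface_residues = [] then
    let length : Int := PySem.Str.len sequence
    PySem.List.pyRange (PySem.Int.floordiv length 3) (PySem.Int.floordiv (2 * length) 3)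
  else
    let present : PySem.Set Int := PySem.Set.ofList interface_residues
    let fuel := interface_residues.length
    -- weight[e] = weight.get(e, 0) + 1 keyed by chain_end(v)
    let weight := interface_residues.foldl
      (fun d v => d.insert (epChainEnd present fuel v) (d.getD (epChainEnd present fuel v) 0 + 1))
      (PySem.Dict.empty : PySem.Dict Int Int)
    -- Python reads weight[chain_end(v)] with __getitem__; the key was inserted by the loop
    -- above for every v of the list, so getD 0 is exact here.
    PySem.List.sorted
      (interface_residues.filter
        (fun v => decide (min_cluster_size ≤ weight.getD (epChainEnd present fuel v) 0)))
      (fun x => x)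

-- ===== PRECONDITION & SPEC =====
def Spec_extract_paratope (sequence : String) (interface_residues : List Int) (min_cluster_size : Int) (out : List Int) : Prop := out = extract_paratope_alt sequence interface_residues min_cluster_size
instance (sequence : String) (interface_residues : List Int) (min_cluster_size : Int) (out : List Int) : Decidable (Spec_extract_paratope sequence interface_residues min_cluster_size out) := by unfold Spec_extract_paratope; infer_instance

-- ===== CLAIM (what is proved, stated in full; the proofs are below) =====
def Claim_equal_extract_paratope : Prop := ∀ (sequence : String) (interface_residues : List Int) (min_cluster_size : Int), Dom_extract_paratope sequence interface_residues min_cluster_size → Spec_extract_paratope sequence interface_residues min_cluster_size (extract_paratope sequence interface_residues min_cluster_size)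

-- ===== LEMMAS AND PROOFS =====

-- the cluster partition of x :: t (maximal runs with gaps ≤ 3), as a structural recursion
def phConsHead (x : Int) : List (List Int) → List (List Int)
  | [] => [[x]]
  | c :: cs => (x :: c) :: cs

def phClus (x : Int) : List Int → List (List Int)
  | [] => [[x]]
  | y :: t => if y - x ≤ 3 then phConsHead x (phClus y t) else [x] :: phClus y t

-- keep the clusters of size ≥ k, concatenated
def phKeep (k : Int) (cs : List (List Int)) : List Int :=
  (cs.filter (fun c => decide (k ≤ (c.length : Int)))).flatten

-- A's final flush of the pending cluster
def phFin (k : Int) (st : List Int × List Int) : List Int :=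
  if k ≤ (st.2.length : Int) then st.1 ++ st.2 else st.1

-- what A's loop still produces when the pending cluster is `cur` and the remaining partition is `cs`
def phGlue (k : Int) (cur : List Int) : List (List Int) → List Int
  | [] => if k ≤ (cur.length : Int) then cur else []
  | c :: cs => (if k ≤ ((cur ++ c.tail).length : Int) then cur ++ c.tail else []) ++ phKeep k cs

lemma phClus_shape (t : List Int) : ∀ x, ∃ r cs, phClus x t = (x :: r) :: cs := by
  induction t with
  | nil => intro x; exact ⟨[], [], rfl⟩
  | cons y t ih =>
    intro x
    obtain ⟨r, cs, h⟩ := ih y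
    by_cases hc : y - x ≤ 3
    · exact ⟨y :: r, cs, by simp [phClus, hc, h, phConsHead]⟩
    · exact ⟨[], phClus y t, by simp [phClus, hc]⟩

lemma phClus_flatten (t : List Int) : ∀ x, (phClus x t).flatten = x :: t := by
  induction t with
  | nil => intro x; simp [phClus]
  | cons y t ih =>
    intro x
    have h := ih y
    by_cases hc : y - x ≤ 3
    · obtain ⟨r, cs, hs⟩ := phClus_shape t y
      rw [hs] at h
      simp only [phClus, hc, if_pos, hs, phConsHead]
      simp_all
    · simp [phClus, hc, h]

lemma phGlue_keep (k y : Int) (cs : List (List Int)) (r : List Int) (cs' : List (List Int))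
    (h : cs = (y :: r) :: cs') : phGlue k [y] cs = phKeep k cs := by
  subst h
  simp only [phGlue, phKeep, List.filter_cons, List.length_cons, List.tail_cons,
    List.cons_append, List.nil_append, Nat.cast_add, Nat.cast_one]
  split
  · simp_all
  · rename_i hno
    rw [if_neg (by simpa using hno)]
    simp

-- A's index loop over range(1, n) is the fold over adjacent pairs of s
lemma phA_idx (s : List Int) (k : Int) :
    ∀ (d j : Nat) (init : List Int × List Int), s.length - j = d →
      (PySem.List.pyRange ((j : Int) + 1) (s.length : Int)).foldl
        (fun st i =>
          if PySem.List.pyGetD s i 0 - PySem.List.pyGetD s (i - 1) 0 ≤ 3 then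
            (st.1, st.2 ++ [PySem.List.pyGetD s i 0])
          else
            ((if k ≤ (st.2.length : Int) then st.1 ++ st.2 else st.1),
             [PySem.List.pyGetD s i 0])) init
      = ((s.drop j).zip (s.drop (j + 1))).foldl
          (fun st p =>
            if p.2 - p.1 ≤ 3 then (st.1, st.2 ++ [p.2])
            else ((if k ≤ (st.2.length : Int) then st.1 ++ st.2 else st.1), [p.2])) init := by
  intro d
  induction d with
  | zero =>
    intro j init hd
    have hj : s.length ≤ j := by omega
    rw [PySem.List.pyRange_one_eq_nil (by exact_mod_cast Nat.le_succ_of_le hj)]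
    rw [List.drop_eq_nil_of_le (by omega : s.length ≤ j + 1)]
    simp
  | succ d ih =>
    intro j init hd
    by_cases hj1 : s.length ≤ j + 1
    · rw [PySem.List.pyRange_one_eq_nil (by exact_mod_cast hj1)]
      rw [List.drop_eq_nil_of_le hj1]
      simp
    · have hj1' : j + 1 < s.length := by omega
      clear hj1
      have hj1 := hj1'
      have hj : j < s.length := by omega
      rw [PySem.List.pyRange_one_cons (by exact_mod_cast hj1)]
      rw [List.foldl_cons]
      have e1 : PySem.List.pyGetD s ((j : Int) + 1) 0 = s[j + 1] := by
        rw [PySem.List.pyGetD_eq_getElem s 0 (by positivity) (by exact_mod_cast hj1)]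
        have ht : ((j : Int) + 1).toNat = j + 1 := by omega
        simp [ht]
      have e0 : PySem.List.pyGetD s ((j : Int) + 1 - 1) 0 = s[j] := by
        rw [show ((j : Int) + 1 - 1) = (j : Int) by ring]
        rw [PySem.List.pyGetD_eq_getElem s 0 (by positivity) (by exact_mod_cast hj)]
        have ht : ((j : Int)).toNat = j := by omega
        simp [ht]
      rw [e1, e0]
      rw [List.drop_eq_getElem_cons hj, List.drop_eq_getElem_cons hj1]
      rw [List.zip_cons_cons, List.foldl_cons]
      dsimp only
      have := ih (j + 1)
        (if s[j + 1] - s[j] ≤ 3 then (init.1, init.2 ++ [s[j + 1]])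
         else ((if k ≤ (init.2.length : Int) then init.1 ++ init.2 else init.1), [s[j + 1]]))
        (by omega)
      rw [List.drop_eq_getElem_cons hj1] at this
      rw [show (((j + 1 : Nat) : Int) + 1) = ((j : Int) + 1 + 1) by push_cast; ring] at this
      exact this

-- A's pair fold plus final flush computes phGlue
lemma phA_pairs (k : Int) :
    ∀ (t : List Int) (x : Int) (p cur : List Int),
      phFin k (((x :: t).zip t).foldl
        (fun st q =>
          if q.2 - q.1 ≤ 3 then (st.1, st.2 ++ [q.2])
          else ((if k ≤ (st.2.length : Int) then st.1 ++ st.2 else st.1), [q.2])) (p, cur))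
      = p ++ phGlue k cur (phClus x t) := by
  intro t
  induction t with
  | nil =>
    intro x p cur
    simp only [List.zip_nil_right, List.foldl_nil, phFin, phGlue, phClus]
    simp only [List.tail_cons, List.append_nil, phKeep, List.filter_nil, List.flatten_nil]
    split_ifs with hh <;> simp
  | cons y t ih =>
    intro x p cur
    rw [List.zip_cons_cons, List.foldl_cons]
    dsimp only
    by_cases hc : y - x ≤ 3
    · rw [if_pos hc, ih y p (cur ++ [y])]
      obtain ⟨r, cs, h⟩ := phClus_shape t y
      simp only [phClus, hc, if_pos, h, phConsHead, phGlue, List.tail_cons,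
        List.append_assoc, List.singleton_append]
    · rw [if_neg hc, ih y _ [y]]
      obtain ⟨r, cs, h⟩ := phClus_shape t y
      rw [phGlue_keep k y _ r cs h]
      have hcl : phClus x (y :: t) = [x] :: phClus y t := by simp [phClus, hc]
      rw [hcl]
      simp only [phGlue, List.tail_cons, List.append_nil]
      split_ifs <;> simp

lemma phKeep_sublist (k : Int) (cs : List (List Int)) : (phKeep k cs).Sublist cs.flatten := by
  induction cs with
  | nil => simp [phKeep]
  | cons c cs ih =>
    simp only [phKeep, List.filter_cons, List.flatten_cons]
    split
    · simpa [phKeep] using List.Sublist.append (List.Sublist.refl c) ih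
    · exact (ih : (phKeep k cs).Sublist cs.flatten).trans (List.sublist_append_right c cs.flatten)

-- ----- B-side lemmas: the chain_end walk identifies each cluster by its last element -----

-- the within-cluster step relation: sorted with adjacent gap ≤ 3
def epR (a b : Int) : Prop := a ≤ b ∧ b ≤ a + 3

lemma epPairwise_of_chain (c : List Int) (h : List.IsChain epR c) : c.Pairwise (· ≤ ·) :=
  List.isChain_iff_pairwise.mp (h.imp fun _ _ hab => hab.1)

lemma epLastD_cons₂ (a b : Int) (l : List Int) :
    (a :: b :: l).getLastD 0 = (b :: l).getLastD 0 := by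
  simp

lemma epLe_getLastD (c : List Int) (hpw : c.Pairwise (· ≤ ·)) :
    ∀ (d : Int), ∀ w ∈ c, w ≤ c.getLastD d := by
  induction c with
  | nil => intro d w hw; simp at hw
  | cons a l ih =>
    intro d w hw
    rw [List.getLastD_cons]
    rcases List.mem_cons.mp hw with h | h
    · subst h
      rcases List.mem_cons.mp (List.getLastD_mem_cons (l := l) (a := w)) with h2 | h2
      · exact le_of_eq h2.symm
      · exact List.rel_of_pairwise_cons hpw h2
    · exact ih (List.Pairwise.of_cons hpw) a w h

lemma epHeadD_le (c : List Int) (hpw : c.Pairwise (· ≤ ·)) :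
    ∀ (d : Int), ∀ w ∈ c, c.headD d ≤ w := by
  intro d w hw
  cases c with
  | nil => simp at hw
  | cons a l =>
    rw [List.headD_cons]
    rcases List.mem_cons.mp hw with h | h
    · omega
    · exact List.rel_of_pairwise_cons hpw h

lemma epGetLastD_append (l : List Int) (v : Int) (r : List Int) :
    ∀ (d : Int), (l ++ v :: r).getLastD d = (v :: r).getLastD d := by
  induction l with
  | nil => intro d; rfl
  | cons a l ih =>
    intro d
    rw [List.cons_append, List.getLastD_cons, ih a, List.getLastD_cons, List.getLastD_cons]

lemma epLast_mem (c : List Int) (hc : c ≠ []) (d : Int) : c.getLastD d ∈ c := by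
  cases c with
  | nil => exact absurd rfl hc
  | cons a l =>
    rw [List.getLastD_cons]
    exact List.getLastD_mem_cons

-- the walk from v along a cluster tail r ends at the cluster's last element
lemma epWalk (present : PySem.Set Int) :
    ∀ (r : List Int) (fuel : Nat) (v : Int),
      List.IsChain epR (v :: r) →
      (∀ w : Int, w ∈ present → w ∈ v :: r ∨ w < v ∨ (v :: r).getLastD 0 + 3 < w) →
      (∀ w ∈ r, w ∈ present) →
      r.length ≤ fuel →
      epChainEnd present fuel v = (v :: r).getLastD 0 := by
  intro r
  induction r with
  | nil =>
    intro fuel v _ hmem _ _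
    have hno : ∀ u : Int, v < u → u ≤ v + 3 → u ∉ present := by
      intro u h1 h2 hc
      rcases hmem u hc with h | h | h
      · simp at h; omega
      · omega
      · simp only [List.getLastD_cons, List.getLastD_nil] at h; omega
    have h1 := hno (v + 1) (by omega) (by omega)
    have h2 := hno (v + 2) (by omega) (by omega)
    have h3 := hno (v + 3) (by omega) (by omega)
    cases fuel with
    | zero => rfl
    | succ f =>
      simp only [epChainEnd, List.getLastD_cons, List.getLastD_nil]
      rw [if_neg (by simpa using h1), if_neg (by simpa using h2), if_neg (by simpa using h3)]
  | cons h r' ih =>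
    intro fuel v hch hmem hmem2 hfuel
    have hRvh : epR v h := (List.isChain_cons_cons.mp hch).1
    have hch' : List.IsChain epR (h :: r') := (List.isChain_cons_cons.mp hch).2
    have hpw' : (h :: r').Pairwise (· ≤ ·) := epPairwise_of_chain _ hch'
    have hlast : (v :: h :: r').getLastD 0 = (h :: r').getLastD 0 := epLastD_cons₂ v h r'
    have hlastge : h ≤ (h :: r').getLastD 0 :=
      epLe_getLastD _ hpw' 0 h List.mem_cons_self
    rw [hlast]
    by_cases hveq : v = h
    · have hres := ih fuel v
        (hveq ▸ hch')
        (by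
          intro w hw
          rcases hmem w hw with hmw | hmw | hmw
          · rcases List.mem_cons.mp hmw with h1 | h1
            · exact Or.inl (h1 ▸ List.mem_cons_self)
            · exact Or.inl (hveq ▸ h1)
          · exact Or.inr (Or.inl hmw)
          · rw [hlast, ← hveq] at hmw
            exact Or.inr (Or.inr hmw))
        (fun w hw => hmem2 w (List.mem_cons_of_mem _ hw))
        (by simp at hfuel ⊢; omega)
      rw [hres, hveq]
    · have hvlt : v < h := lt_of_le_of_ne hRvh.1 hveq
      cases fuel with
      | zero => simp at hfuel
      | succ f =>
        have hchcont : h ∈ present := hmem2 h List.mem_cons_self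
        have hnotlow : ∀ u : Int, v < u → u < h → u ∉ present := by
          intro u h1 h2 hc
          rcases hmem u hc with hmw | hmw | hmw
          · rcases List.mem_cons.mp hmw with h3 | h3
            · omega
            · rcases List.mem_cons.mp h3 with h4 | h4
              · omega
              · have := List.rel_of_pairwise_cons hpw' h4; omega
          · omega
          · rw [hlast] at hmw; omega
        have hstepgoal : epChainEnd present f h = (h :: r').getLastD 0 := by
          apply ih f h hch'
          · intro w hw
            rcases hmem w hw with hmw | hmw | hmw
            · rcases List.mem_cons.mp hmw with h3 | h3
              · exact Or.inr (Or.inl (h3 ▸ hvlt))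
              · exact Or.inl h3
            · exact Or.inr (Or.inl (by omega))
            · rw [hlast] at hmw
              exact Or.inr (Or.inr hmw)
          · exact fun w hw => hmem2 w (List.mem_cons_of_mem _ hw)
          · simp at hfuel ⊢; omega
        have hh3 : h = v + 1 ∨ h = v + 2 ∨ h = v + 3 := by
          have := hRvh.2; omega
        rcases hh3 with he | he | he
        · rw [show epChainEnd present (f + 1) v = epChainEnd present f (v + 1) by
            simp only [epChainEnd]
            rw [if_pos (by simpa using (he ▸ hchcont))]]
          rw [he] at hstepgoal ⊢; exact hstepgoal
        · have h1 : v + 1 ∉ present := hnotlow (v + 1) (by omega) (by omega)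
          rw [show epChainEnd present (f + 1) v = epChainEnd present f (v + 2) by
            simp only [epChainEnd]
            rw [if_neg (by simpa using h1), if_pos (by simpa using (he ▸ hchcont))]]
          rw [he] at hstepgoal ⊢; exact hstepgoal
        · have h1 : v + 1 ∉ present := hnotlow (v + 1) (by omega) (by omega)
          have h2 : v + 2 ∉ present := hnotlow (v + 2) (by omega) (by omega)
          rw [show epChainEnd present (f + 1) v = epChainEnd present f (v + 3) by
            simp only [epChainEnd]
            rw [if_neg (by simpa using h1), if_neg (by simpa using h2),
              if_pos (by simpa using (he ▸ hchcont))]]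
          rw [he] at hstepgoal ⊢; exact hstepgoal

-- phClus of a sorted list: every cluster is a nonempty gap-≤3 chain, and clusters are
-- separated by gaps > 3 (stated on last/head)
lemma epClusStruct : ∀ (t : List Int) (x : Int), (x :: t).Pairwise (· ≤ ·) →
    (∀ c ∈ phClus x t, c ≠ [] ∧ List.IsChain epR c) ∧
    (phClus x t).Pairwise (fun c c' => c.getLastD 0 + 3 < c'.headD 0) := by
  intro t
  induction t with
  | nil =>
    intro x _
    refine ⟨?_, by simp [phClus]⟩
    intro c hc
    simp only [phClus, List.mem_singleton] at hc
    subst hc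
    exact ⟨by simp, List.isChain_singleton x⟩
  | cons y t ih =>
    intro x hpw
    have hxy : x ≤ y := List.rel_of_pairwise_cons hpw List.mem_cons_self
    have hpw' : (y :: t).Pairwise (· ≤ ·) := List.Pairwise.of_cons hpw
    obtain ⟨hprops, hpair⟩ := ih y hpw'
    obtain ⟨r, cs, hsh⟩ := phClus_shape t y
    by_cases hc : y - x ≤ 3
    · have heq : phClus x (y :: t) = (x :: y :: r) :: cs := by
        simp [phClus, hc, hsh, phConsHead]
      rw [heq]
      have hfirst := hprops (y :: r) (hsh ▸ List.mem_cons_self)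
      constructor
      · intro c hcm
        rcases List.mem_cons.mp hcm with h1 | h1
        · subst h1
          exact ⟨by simp, List.isChain_cons_cons.mpr ⟨⟨hxy, by omega⟩, hfirst.2⟩⟩
        · exact hprops c (hsh ▸ List.mem_cons_of_mem _ h1)
      · rw [hsh] at hpair
        have hrel := (List.pairwise_cons.mp hpair).1
        refine List.pairwise_cons.mpr ⟨?_, (List.pairwise_cons.mp hpair).2⟩
        intro c' hc'
        have := hrel c' hc'
        rw [List.getLastD_cons] at this
        rw [List.getLastD_cons, List.getLastD_cons]
        exact this
    · have heq2 : phClus x (y :: t) = [x] :: phClus y t := by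
        simp [phClus, hc]
      rw [heq2]
      constructor
      · intro c hcm
        rcases List.mem_cons.mp hcm with h1 | h1
        · exact h1 ▸ ⟨by simp, List.isChain_singleton x⟩
        · exact hprops c h1
      · refine List.pairwise_cons.mpr ⟨?_, hpair⟩
        intro c' hc'
        rw [List.getLastD_cons, List.getLastD_nil]
        rw [hsh] at hc'
        rcases List.mem_cons.mp hc' with h1 | h1
        · subst h1
          rw [List.headD_cons]
          omega
        · -- a later cluster: x + 3 < y ≤ last(y::r) < head c' - 3
          have hfirst := hprops (y :: r) (hsh ▸ List.mem_cons_self)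
          have hylast : y ≤ (y :: r).getLastD 0 :=
            epLe_getLastD _ (epPairwise_of_chain _ hfirst.2) 0 y List.mem_cons_self
          rw [hsh] at hpair
          have := List.rel_of_pairwise_cons hpair h1
          omega

-- the trichotomy: every element of the flattened list is in c, below c, or beyond c's last + 3
lemma epSep : ∀ (cs : List (List Int)),
    (∀ c ∈ cs, c ≠ [] ∧ List.IsChain epR c) →
    cs.Pairwise (fun c c' => c.getLastD 0 + 3 < c'.headD 0) →
    ∀ c ∈ cs, ∀ w ∈ cs.flatten, w ∈ c ∨ w < c.headD 0 ∨ c.getLastD 0 + 3 < w := by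
  intro cs
  induction cs with
  | nil => intro _ _ c hc; simp at hc
  | cons c₀ rest ih =>
    intro hprops hpair c hcm w hw
    have hrel := (List.pairwise_cons.mp hpair).1
    rw [List.flatten_cons, List.mem_append] at hw
    rcases List.mem_cons.mp hcm with h1 | h1
    · subst h1
      rcases hw with hw | hw
      · exact Or.inl hw
      · obtain ⟨c', hc', hwc'⟩ := List.mem_flatten.mp hw
        have hhead : c'.headD 0 ≤ w :=
          epHeadD_le c' (epPairwise_of_chain _ (hprops c' (List.mem_cons_of_mem _ hc')).2) 0 w hwc'
        have := hrel c' hc'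
        exact Or.inr (Or.inr (by omega))
    · rcases hw with hw | hw
      · have hwle : w ≤ c₀.getLastD 0 :=
          epLe_getLastD c₀ (epPairwise_of_chain _ (hprops c₀ List.mem_cons_self).2) 0 w hw
        have := hrel c h1
        have hhl : c.headD 0 ≤ c.getLastD 0 := by
          have hcne := (hprops c (List.mem_cons_of_mem _ h1)).1
          exact epHeadD_le c (epPairwise_of_chain _ (hprops c (List.mem_cons_of_mem _ h1)).2) 0 _
            (epLast_mem c hcne 0)
        exact Or.inr (Or.inl (by omega))
      · exact ih (fun c' h => hprops c' (List.mem_cons_of_mem _ h))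
          (List.Pairwise.of_cons hpair) c h1 w hw

-- chain_end is constant on every cluster: it returns the cluster's last element
lemma epChainEnd_cluster (present : PySem.Set Int) (fuel : Nat) (x : Int) (t : List Int)
    (hs : (x :: t).Pairwise (· ≤ ·))
    (hmem : ∀ w : Int, w ∈ present ↔ w ∈ x :: t)
    (hfuel : (x :: t).length ≤ fuel) :
    ∀ c ∈ phClus x t, ∀ v ∈ c, epChainEnd present fuel v = c.getLastD 0 := by
  obtain ⟨hprops, hpair⟩ := epClusStruct t x hs
  intro c hcm v hv
  obtain ⟨l, r, hc⟩ := List.append_of_mem hv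
  have hch : List.IsChain epR c := (hprops c hcm).2
  have hpwc : c.Pairwise (· ≤ ·) := epPairwise_of_chain c hch
  have hsuffix : List.IsChain epR (v :: r) := hch.suffix ⟨l, hc.symm⟩
  have hlastc : c.getLastD 0 = (v :: r).getLastD 0 := by
    rw [hc]; exact epGetLastD_append l v r 0
  have htri := epSep (phClus x t) hprops hpair c hcm
  rw [phClus_flatten t x] at htri
  have hsubc : c.Sublist (x :: t) := by
    have := (List.infix_of_mem_flatten hcm).sublist
    rwa [phClus_flatten t x] at this
  have hwalk := epWalk present r fuel v hsuffix
    (by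
      intro w hw
      rcases htri w ((hmem w).mp hw) with hmw | hmw | hmw
      · rw [hc, List.mem_append] at hmw
        rcases hmw with h1 | h1
        · -- w before v in the cluster: w ≤ v
          have hwle : w ≤ v := by
            rw [hc] at hpwc
            exact (List.pairwise_append.mp hpwc).2.2 w h1 v List.mem_cons_self
          rcases lt_or_eq_of_le hwle with h2 | h2
          · exact Or.inr (Or.inl h2)
          · exact Or.inl (h2 ▸ List.mem_cons_self)
        · exact Or.inl h1
      · have : c.headD 0 ≤ v := epHeadD_le c hpwc 0 v hv
        exact Or.inr (Or.inl (by omega))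
      · rw [hlastc] at hmw
        exact Or.inr (Or.inr hmw))
    (by
      intro w hw
      apply (hmem w).mpr
      exact hsubc.mem (hc ▸ List.mem_append_right l (List.mem_cons_of_mem v hw)))
    (by
      have h1 : c.length ≤ (x :: t).length := hsubc.length_le
      rw [hc] at h1
      simp at h1 hfuel ⊢
      omega)
  rw [hwalk, hlastc]

-- counting: when f maps each cluster to its (strictly increasing) last element,
-- the count of c's last in the mapped flatten is c's size
lemma epCount (f : Int → Int) : ∀ (cs : List (List Int)),
    (∀ c' ∈ cs, ∀ v ∈ c', f v = c'.getLastD 0) →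
    (cs.map (fun c => c.getLastD 0)).Pairwise (· < ·) →
    ∀ c ∈ cs, (cs.flatten.map f).count (c.getLastD 0) = c.length := by
  intro cs
  induction cs with
  | nil => intro _ _ c hc; simp at hc
  | cons c₀ rest ih =>
    intro hf hpair c hcm
    have hrepl : c₀.map f = List.replicate c₀.length (c₀.getLastD 0) := by
      have := List.eq_replicate_of_mem (a := c₀.getLastD 0) (l := c₀.map f)
        (by
          intro b hb
          obtain ⟨v, hv, hfv⟩ := List.mem_map.mp hb
          rw [← hfv]; exact hf c₀ List.mem_cons_self v hv)
      rwa [List.length_map] at this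
    have hlt : ∀ c' ∈ rest, c₀.getLastD 0 < c'.getLastD 0 := by
      intro c' hc'
      have := List.rel_of_pairwise_cons hpair (List.mem_map_of_mem (f := fun c => c.getLastD 0) hc')
      exact this
    rw [List.flatten_cons, List.map_append, List.count_append, hrepl]
    rcases List.mem_cons.mp hcm with h1 | h1
    · subst h1
      have hzero : (rest.flatten.map f).count (c.getLastD 0) = 0 := by
        rw [List.count_eq_zero]
        intro hmem
        obtain ⟨v, hv, hfv⟩ := List.mem_map.mp hmem
        obtain ⟨c', hc', hvc'⟩ := List.mem_flatten.mp hv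
        rw [hf c' (List.mem_cons_of_mem _ hc') v hvc'] at hfv
        have := hlt c' hc'
        omega
      rw [hzero, List.count_replicate]
      simp
    · have hzero : (List.replicate c₀.length (c₀.getLastD 0)).count (c.getLastD 0) = 0 := by
        have := hlt c h1
        simp only [List.count_replicate, beq_iff_eq]
        rw [if_neg (by omega : ¬ c₀.getLastD 0 = c.getLastD 0)]
      rw [hzero, Nat.zero_add]
      exact ih (fun c' h => hf c' (List.mem_cons_of_mem _ h))
        (List.Pairwise.of_cons hpair) c h1

-- filtering a flatten with a predicate constant on each cluster is phKeep
lemma epFilterKeep (p : Int → Bool) (k : Int) : ∀ (cs : List (List Int)),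
    (∀ c ∈ cs, ∀ v ∈ c, p v = decide (k ≤ (c.length : Int))) →
    cs.flatten.filter p = phKeep k cs := by
  intro cs
  induction cs with
  | nil => intro _; simp [phKeep]
  | cons c rest ih =>
    intro hp
    rw [List.flatten_cons, List.filter_append]
    have hrest := ih (fun c' h => hp c' (List.mem_cons_of_mem _ h))
    simp only [phKeep, List.filter_cons]
    cases hkc : decide (k ≤ (c.length : Int)) with
    | true =>
      have : c.filter p = c := List.filter_eq_self.mpr
        (fun v hv => by rw [hp c List.mem_cons_self v hv, hkc])
      rw [this]
      simp only [if_true]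
      simp only [List.flatten_cons]
      rw [hrest]
      rfl
    | false =>
      have : c.filter p = [] := List.filter_eq_nil_iff.mpr
        (fun v hv => by rw [hp c List.mem_cons_self v hv, hkc]; simp)
      rw [this]
      simpa [phKeep] using hrest

-- ===== VERDICT (by name: the statement is the Claim_ definition above) =====
theorem extract_paratope_spec : Claim_equal_extract_paratope := by
  intro seq ir k _
  unfold Spec_extract_paratope
  by_cases hir : ir = []
  · simp [extract_paratope, extract_paratope_alt, hir]
  · rcases hxt : PySem.List.sorted ir (fun x => x) with _ | ⟨x, t⟩
    · exact absurd ((PySem.List.sorted_eq_nil_iff ir (fun x => x) false).1 hxt) hir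
    · have hpair : List.Pairwise (fun a b => a ≤ b) (x :: t) := by
        have := PySem.List.sorted_pairwise ir (fun x => x)
        rwa [hxt] at this
      -- ---------- A side reduces to phKeep k (phClus x t) ----------
      simp only [extract_paratope, if_neg hir, hxt, PySem.List.pyGetD_zero_cons]
      have hidx := phA_idx (x :: t) k (x :: t).length 0 ([], [x]) (by simp)
      simp only [Nat.cast_zero, zero_add, List.drop_zero, List.drop_one,
        List.tail_cons] at hidx
      rw [hidx]
      have hfin : ∀ st : List Int × List Int,
          (if k ≤ (st.2.length : Int) then st.1 ++ st.2 else st.1) = phFin k st := fun _ => rfl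
      rw [hfin]
      rw [phA_pairs k t x [] [x]]
      obtain ⟨r, cs, hsh⟩ := phClus_shape t x
      rw [List.nil_append, phGlue_keep k x _ r cs hsh]
      have hsub : (phKeep k (phClus x t)).Sublist (x :: t) := by
        have h1 := phKeep_sublist k (phClus x t)
        rwa [phClus_flatten t x] at h1
      rw [PySem.List.sorted_eq_self_of_pairwise _ _ (hpair.sublist hsub)]
      -- ---------- B side reduces to the same phKeep k (phClus x t) ----------
      simp only [extract_paratope_alt, if_neg hir]
      set present : PySem.Set Int := PySem.Set.ofList ir with hpres
      set fuel := ir.length with hfuelDef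
      set f : Int → Int := fun v => epChainEnd present fuel v with hf
      have hmem : ∀ w : Int, w ∈ present ↔ w ∈ x :: t := by
        intro w
        rw [hpres, PySem.Set.mem_ofList,
          ← PySem.List.mem_sorted ir (fun x => x) false w, hxt]
      have hfuel : (x :: t).length ≤ fuel := by
        rw [hfuelDef, ← PySem.List.length_sorted ir (fun x => x) false, hxt]
      obtain ⟨hprops, hpairsep⟩ := epClusStruct t x hpair
      have hconst := epChainEnd_cluster present fuel x t hpair hmem hfuel
      have hperm : (x :: t).Perm ir := by
        rw [← hxt]; exact PySem.List.sorted_perm ir (fun x => x) false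
      -- the weight dict reads back as a counter over (ir.map f)
      have hweight : ∀ z : Int,
          (ir.foldl (fun d v => d.insert (epChainEnd present fuel v)
              (d.getD (epChainEnd present fuel v) 0 + 1))
            (PySem.Dict.empty : PySem.Dict Int Int)).getD z 0 = ((ir.map f).count z : Int) := by
        intro z
        rw [show (fun (d : PySem.Dict Int Int) v => d.insert (epChainEnd present fuel v)
              (d.getD (epChainEnd present fuel v) 0 + 1))
            = (fun (d : PySem.Dict Int Int) v => d.insert (f v) (d.getD (f v) 0 + 1)) from rfl]
        rw [← List.foldl_map (f := f)
          (g := fun (d : PySem.Dict Int Int) z => d.insert z (d.getD z 0 + 1))]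
        rw [PySem.Dict.getD_foldl_insert_add_one, PySem.Dict.getD_empty]
        ring
      -- lasts are strictly increasing across clusters
      have hlastlt : ((phClus x t).map (fun c => c.getLastD 0)).Pairwise (· < ·) := by
        rw [List.pairwise_map]
        refine List.Pairwise.imp_of_mem ?_ hpairsep
        intro c c' hcmem hc'mem hrel
        have hc'ne := (hprops c' hc'mem).1
        have : c'.headD 0 ≤ c'.getLastD 0 :=
          epHeadD_le c' (epPairwise_of_chain _ (hprops c' hc'mem).2) 0 _ (epLast_mem c' hc'ne 0)
        omega
      have hcount := epCount f (phClus x t) hconst hlastlt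
      -- the filter predicate is constant on every cluster: "cluster size ≥ k"
      set W := ir.foldl (fun d v => d.insert (epChainEnd present fuel v)
          (d.getD (epChainEnd present fuel v) 0 + 1))
        (PySem.Dict.empty : PySem.Dict Int Int) with hWdef
      set P : Int → Bool := fun v => decide (k ≤ W.getD (epChainEnd present fuel v) 0) with hP
      have hPconst : ∀ c ∈ phClus x t, ∀ v ∈ c, P v = decide (k ≤ (c.length : Int)) := by
        intro c hcm v hv
        rw [hP]
        simp only
        rw [hWdef, hweight (epChainEnd present fuel v)]
        have hfv : f v = c.getLastD 0 := hconst c hcm v hv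
        rw [show epChainEnd present fuel v = f v from rfl, hfv]
        have hcnt : ((ir.map f).count (c.getLastD 0)) = c.length := by
          rw [← List.Perm.count_eq (hperm.map f) (c.getLastD 0)]
          have := hcount c hcm
          rwa [show (x :: t).map f = (phClus x t).flatten.map f by rw [phClus_flatten]] 
        rw [hcnt]
      have hBfilter : (x :: t).filter P = phKeep k (phClus x t) := by
        have := epFilterKeep P k (phClus x t) hPconst
        rwa [phClus_flatten t x] at this
      have hsortB : PySem.List.sorted (ir.filter P) (fun x => x) = (x :: t).filter P := by
        refine PySem.List.sorted_id_eq_of_perm_of_pairwise _ _ (hperm.filter P) ?_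
        exact List.Pairwise.sublist List.filter_sublist hpair
      rw [hsortB, hBfilter]
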